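-- pv_equiv track=rewrite | github.com/dkyazzentwatwa/flow-healer | src/flow_healer/healer_triage.py | _connector_debug_focus
-- ===== SOURCE A (Python) =====
-- from typing import Any
--
-- def _connector_debug_focus(issue: dict[str, Any] | None, attempt: dict[str, Any] | None) -> str:
--     failure_class = str((attempt or {}).get("failure_class") or (issue or {}).get("last_failure_class") or "").strip()
--     failure_reason = str((attempt or {}).get("failure_reason") or (issue or {}).get("last_failure_reason") or "").lower()
--     if failure_class == "connector_unavailable" or any(
--         marker in failure_reason for marker in ("connectorunavailable", "unable to resolve", "not found", "command")
--     ):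
--         return "command_resolution"
--     if failure_class == "connector_runtime_error" or any(
--         marker in failure_reason for marker in ("connectorruntimeerror", "timed out", "mcp startup", "transport channel closed")
--     ):
--         return "runtime_crash"
--     if failure_class == "no_patch" or any(
--         marker in failure_reason for marker in ("no patch", "empty diff", "empty output", "no unified diff")
--     ):
--         return "empty_diff"
--     if failure_class == "empty_diff":
--         return "empty_diff"
--     if failure_class == "malformed_diff" or any(
--         marker in failure_reason for marker in ("malformed diff", "invalid patch syntax", "missing hunk header")
--     ):
--         return "diff_fence"
--     if _is_no_workspace_change_failure_class(failure_class) or any(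
--         marker in failure_reason for marker in ("no workspace change", "did not edit files", "no file edits")
--     ):
--         return "empty_diff"
--     if failure_class == "patch_apply_failed" or any(
--         marker in failure_reason for marker in ("git apply", "patch apply", "corrupt patch", "reject")
--     ):
--         return "patch_apply"
--     if failure_class == "no_code_diff" or any(
--         marker in failure_reason for marker in ("docs-only", "artifact-only", "code-change task produced only")
--     ):
--         return "contract_comparison"
--     if failure_class == "verifier_failed" or any(
--         marker in failure_reason for marker in ("invalid json", "json", "verdict", "payload")
--     ):
--         return "verifier_payload"
--     if failure_class == "diff_limit_exceeded" or any(
--         marker in failure_reason for marker in ("diff fence", "fenced block", "```diff", "malformed diff")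
--     ):
--         return "diff_fence"
--     return "contract_comparison"
--
-- def _is_no_workspace_change_failure_class(failure_class: str) -> bool:
--     normalized = str(failure_class or "").strip()
--     return normalized == "no_workspace_change" or normalized.startswith("no_workspace_change:")
-- ===== SOURCE B (Python) =====
-- from typing import Any
--
-- def _is_no_workspace_change_failure_class(failure_class: str) -> bool:
--     normalized = str(failure_class or "").strip()
--     return normalized == "no_workspace_change" or normalized.startswith("no_workspace_change:")
--
-- # Rule index per failure class (workspace-change classes are handled by predicate -> 5).
-- _CLASS_INDEX = {
--     "connector_unavailable": 0,
--     "connector_runtime_error": 1,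
--     "no_patch": 2,
--     "empty_diff": 3,
--     "malformed_diff": 4,
--     "patch_apply_failed": 6,
--     "no_code_diff": 7,
--     "verifier_failed": 8,
--     "diff_limit_exceeded": 9,
-- }
--
-- # Marker group per rule index (rule 3 has no markers).
-- _RULE_MARKERS = [
--     ("connectorunavailable", "unable to resolve", "not found", "command"),
--     ("connectorruntimeerror", "timed out", "mcp startup", "transport channel closed"),
--     ("no patch", "empty diff", "empty output", "no unified diff"),
--     (),
--     ("malformed diff", "invalid patch syntax", "missing hunk header"),
--     ("no workspace change", "did not edit files", "no file edits"),
--     ("git apply", "patch apply", "corrupt patch", "reject"),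
--     ("docs-only", "artifact-only", "code-change task produced only"),
--     ("invalid json", "json", "verdict", "payload"),
--     ("diff fence", "fenced block", "```diff", "malformed diff"),
-- ]
--
-- # Result per rule index; index 10 is the default.
-- _RESULTS = [
--     "command_resolution", "runtime_crash", "empty_diff", "empty_diff", "diff_fence",
--     "empty_diff", "patch_apply", "contract_comparison", "verifier_payload", "diff_fence",
--     "contract_comparison",
-- ]
--
-- def _connector_debug_focus(issue: dict[str, Any] | None, attempt: dict[str, Any] | None) -> str:
--     failure_class = str((attempt or {}).get("failure_class") or (issue or {}).get("last_failure_class") or "").strip()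
--     failure_reason = str((attempt or {}).get("failure_reason") or (issue or {}).get("last_failure_reason") or "").lower()
--     ci = 5 if _is_no_workspace_change_failure_class(failure_class) else _CLASS_INDEX.get(failure_class, 10)
--     mi = next((i for i, ms in enumerate(_RULE_MARKERS) if any(m in failure_reason for m in ms)), 10)
--     return _RESULTS[min(ci, mi)]
-- ===== Notes on version B (the rewrite author's own statement) =====
-- stated objective: alternative
-- what changed: Instead of walking A's ordered if-chain until a branch fires, B computes two independent rule indices - the class's index via a dict lookup (with the workspace-change predicate mapping to 5) and the first index whose reason-marker group matches - and returns the result table entry at the minimum of the two.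
import Mathlib
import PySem

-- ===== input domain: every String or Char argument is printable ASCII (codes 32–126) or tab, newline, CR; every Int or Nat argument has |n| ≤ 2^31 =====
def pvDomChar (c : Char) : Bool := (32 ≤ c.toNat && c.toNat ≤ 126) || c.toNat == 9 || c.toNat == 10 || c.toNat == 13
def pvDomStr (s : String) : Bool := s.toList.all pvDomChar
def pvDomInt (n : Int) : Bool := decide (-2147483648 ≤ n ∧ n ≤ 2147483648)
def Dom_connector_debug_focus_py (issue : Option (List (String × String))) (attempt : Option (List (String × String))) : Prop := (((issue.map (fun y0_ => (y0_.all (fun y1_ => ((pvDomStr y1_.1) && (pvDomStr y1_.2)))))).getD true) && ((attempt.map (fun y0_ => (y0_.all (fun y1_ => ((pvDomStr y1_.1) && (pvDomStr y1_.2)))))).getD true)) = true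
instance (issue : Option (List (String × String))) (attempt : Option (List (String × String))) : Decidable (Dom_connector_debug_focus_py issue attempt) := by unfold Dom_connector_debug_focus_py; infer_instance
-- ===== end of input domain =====

-- B replaces A's ordered if-chain by an arithmetic formulation: it computes the class's
-- rule index (dict lookup) and the first rule index whose reason markers match,
-- independently, and returns the result table entry at the minimum of the two
-- (objective: alternative decomposition; same value on every input).

-- ===== PORT A =====
-- `x or y` on strings: x if non-empty else y
def pvOrStr (a : Option String) (b : String) : String :=
  match a with
  | some s => if s == "" then b else s
  | none => b

-- helper _is_no_workspace_change_failure_class (shared by both Pythons)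
def is_no_workspace_change_failure_class_py (failure_class : String) : Bool :=
  let normalized := PySem.Str.strip (if failure_class == "" then "" else failure_class)
  normalized == "no_workspace_change" || PySem.Str.startswith normalized "no_workspace_change:"

def connector_debug_focus_py (issue : Option (List (String × String))) (attempt : Option (List (String × String))) : String :=
  let failure_class := PySem.Str.strip (pvOrStr ((PySem.Dict.mk (attempt.getD [])).get? "failure_class")
    (pvOrStr ((PySem.Dict.mk (issue.getD [])).get? "last_failure_class") ""))
  let failure_reason := PySem.Str.lower (pvOrStr ((PySem.Dict.mk (attempt.getD [])).get? "failure_reason")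
    (pvOrStr ((PySem.Dict.mk (issue.getD [])).get? "last_failure_reason") ""))
  if failure_class == "connector_unavailable" ||
      (["connectorunavailable", "unable to resolve", "not found", "command"].any (fun m => PySem.Str.isIn m failure_reason)) then
    "command_resolution"
  else if failure_class == "connector_runtime_error" ||
      (["connectorruntimeerror", "timed out", "mcp startup", "transport channel closed"].any (fun m => PySem.Str.isIn m failure_reason)) then
    "runtime_crash"
  else if failure_class == "no_patch" ||
      (["no patch", "empty diff", "empty output", "no unified diff"].any (fun m => PySem.Str.isIn m failure_reason)) then
    "empty_diff"
  else if failure_class == "empty_diff" then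
    "empty_diff"
  else if failure_class == "malformed_diff" ||
      (["malformed diff", "invalid patch syntax", "missing hunk header"].any (fun m => PySem.Str.isIn m failure_reason)) then
    "diff_fence"
  else if is_no_workspace_change_failure_class_py failure_class ||
      (["no workspace change", "did not edit files", "no file edits"].any (fun m => PySem.Str.isIn m failure_reason)) then
    "empty_diff"
  else if failure_class == "patch_apply_failed" ||
      (["git apply", "patch apply", "corrupt patch", "reject"].any (fun m => PySem.Str.isIn m failure_reason)) then
    "patch_apply"
  else if failure_class == "no_code_diff" ||
      (["docs-only", "artifact-only", "code-change task produced only"].any (fun m => PySem.Str.isIn m failure_reason)) then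
    "contract_comparison"
  else if failure_class == "verifier_failed" ||
      (["invalid json", "json", "verdict", "payload"].any (fun m => PySem.Str.isIn m failure_reason)) then
    "verifier_payload"
  else if failure_class == "diff_limit_exceeded" ||
      (["diff fence", "fenced block", "```diff", "malformed diff"].any (fun m => PySem.Str.isIn m failure_reason)) then
    "diff_fence"
  else
    "contract_comparison"

-- ===== PORT B =====
-- _CLASS_INDEX: rule index per failure class (workspace-change classes via the predicate -> 5)
def pvClassIndexDict : PySem.Dict String Nat :=
  PySem.Dict.mk
    [("connector_unavailable", 0), ("connector_runtime_error", 1), ("no_patch", 2),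
     ("empty_diff", 3), ("malformed_diff", 4), ("patch_apply_failed", 6),
     ("no_code_diff", 7), ("verifier_failed", 8), ("diff_limit_exceeded", 9)]

-- _RULE_MARKERS: marker group per rule index (rule 3 has none)
def pvRuleMarkers : List (List String) :=
  [["connectorunavailable", "unable to resolve", "not found", "command"],
   ["connectorruntimeerror", "timed out", "mcp startup", "transport channel closed"],
   ["no patch", "empty diff", "empty output", "no unified diff"],
   [],
   ["malformed diff", "invalid patch syntax", "missing hunk header"],
   ["no workspace change", "did not edit files", "no file edits"],
   ["git apply", "patch apply", "corrupt patch", "reject"],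
   ["docs-only", "artifact-only", "code-change task produced only"],
   ["invalid json", "json", "verdict", "payload"],
   ["diff fence", "fenced block", "```diff", "malformed diff"]]

-- _RESULTS: result per rule index; index 10 is the default
def pvResults : List String :=
  ["command_resolution", "runtime_crash", "empty_diff", "empty_diff", "diff_fence",
   "empty_diff", "patch_apply", "contract_comparison", "verifier_payload", "diff_fence",
   "contract_comparison"]

-- `ci = 5 if _is_no_workspace_change_failure_class(fc) else _CLASS_INDEX.get(fc, 10)`
def pvClassIndex (fc : String) : Nat :=
  if is_no_workspace_change_failure_class_py fc then 5 else pvClassIndexDict.getD fc 10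

-- `mi = next((i for i, ms in enumerate(_RULE_MARKERS) if any(m in fr for m in ms)), 10)`
def pvMarkerIndex (fr : String) (i : Nat) : List (List String) → Nat
  | [] => 10
  | ms :: rest => if ms.any (fun m => PySem.Str.isIn m fr) then i else pvMarkerIndex fr (i + 1) rest

def connector_debug_focus_py_alt (issue : Option (List (String × String))) (attempt : Option (List (String × String))) : String :=
  let failure_class := PySem.Str.strip (pvOrStr ((PySem.Dict.mk (attempt.getD [])).get? "failure_class")
    (pvOrStr ((PySem.Dict.mk (issue.getD [])).get? "last_failure_class") ""))
  let failure_reason := PySem.Str.lower (pvOrStr ((PySem.Dict.mk (attempt.getD [])).get? "failure_reason")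
    (pvOrStr ((PySem.Dict.mk (issue.getD [])).get? "last_failure_reason") ""))
  let ci := pvClassIndex failure_class
  let mi := pvMarkerIndex failure_reason 0 pvRuleMarkers
  -- _RESULTS[min(ci, mi)]: the index is always < 11, so plain getD is exact here
  pvResults.getD (min ci mi) ""

-- ===== PRECONDITION & SPEC =====
def Spec_connector_debug_focus_py (issue : Option (List (String × String))) (attempt : Option (List (String × String))) (out : String) : Prop := out = connector_debug_focus_py_alt issue attempt
instance (issue : Option (List (String × String))) (attempt : Option (List (String × String))) (out : String) : Decidable (Spec_connector_debug_focus_py issue attempt out) := by unfold Spec_connector_debug_focus_py; infer_instance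

-- ===== CLAIM (what is proved, stated in full; the proofs are below) =====
def Claim_equal_connector_debug_focus_py : Prop := ∀ (issue : Option (List (String × String))) (attempt : Option (List (String × String))), Dom_connector_debug_focus_py issue attempt → Spec_connector_debug_focus_py issue attempt (connector_debug_focus_py issue attempt)

-- ===== LEMMAS AND PROOFS =====
theorem pv_get?_mk_nil {k : String} : (PySem.Dict.mk ([] : List (String × Nat))).get? k = none := rfl

-- core: for any failure_class / failure_reason pair, A's if-chain equals B's
-- table lookup at min(class index, first matching marker-group index)
theorem pv_core_eq (fc fr : String) :
    (if fc == "connector_unavailable" ||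
        (["connectorunavailable", "unable to resolve", "not found", "command"].any (fun m => PySem.Str.isIn m fr)) then
      "command_resolution"
    else if fc == "connector_runtime_error" ||
        (["connectorruntimeerror", "timed out", "mcp startup", "transport channel closed"].any (fun m => PySem.Str.isIn m fr)) then
      "runtime_crash"
    else if fc == "no_patch" ||
        (["no patch", "empty diff", "empty output", "no unified diff"].any (fun m => PySem.Str.isIn m fr)) then
      "empty_diff"
    else if fc == "empty_diff" then
      "empty_diff"
    else if fc == "malformed_diff" ||
        (["malformed diff", "invalid patch syntax", "missing hunk header"].any (fun m => PySem.Str.isIn m fr)) then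
      "diff_fence"
    else if is_no_workspace_change_failure_class_py fc ||
        (["no workspace change", "did not edit files", "no file edits"].any (fun m => PySem.Str.isIn m fr)) then
      "empty_diff"
    else if fc == "patch_apply_failed" ||
        (["git apply", "patch apply", "corrupt patch", "reject"].any (fun m => PySem.Str.isIn m fr)) then
      "patch_apply"
    else if fc == "no_code_diff" ||
        (["docs-only", "artifact-only", "code-change task produced only"].any (fun m => PySem.Str.isIn m fr)) then
      "contract_comparison"
    else if fc == "verifier_failed" ||
        (["invalid json", "json", "verdict", "payload"].any (fun m => PySem.Str.isIn m fr)) then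
      "verifier_payload"
    else if fc == "diff_limit_exceeded" ||
        (["diff fence", "fenced block", "```diff", "malformed diff"].any (fun m => PySem.Str.isIn m fr)) then
      "diff_fence"
    else
      "contract_comparison")
    = pvResults.getD (min (pvClassIndex fc) (pvMarkerIndex fr 0 pvRuleMarkers)) "" := by
  simp only [pvClassIndex, pvClassIndexDict, pvRuleMarkers, pvMarkerIndex, pvResults,
    PySem.Dict.getD_eq_get?_getD, PySem.Dict.get?_mk_cons, pv_get?_mk_nil, List.any_nil]
  generalize (List.any ["connectorunavailable", "unable to resolve", "not found", "command"] (fun m => PySem.Str.isIn m fr)) = a0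
  generalize (List.any ["connectorruntimeerror", "timed out", "mcp startup", "transport channel closed"] (fun m => PySem.Str.isIn m fr)) = a1
  generalize (List.any ["no patch", "empty diff", "empty output", "no unified diff"] (fun m => PySem.Str.isIn m fr)) = a2
  generalize (List.any ["malformed diff", "invalid patch syntax", "missing hunk header"] (fun m => PySem.Str.isIn m fr)) = a4
  generalize (List.any ["no workspace change", "did not edit files", "no file edits"] (fun m => PySem.Str.isIn m fr)) = a5
  generalize (List.any ["git apply", "patch apply", "corrupt patch", "reject"] (fun m => PySem.Str.isIn m fr)) = a6
  generalize (List.any ["docs-only", "artifact-only", "code-change task produced only"] (fun m => PySem.Str.isIn m fr)) = a7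
  generalize (List.any ["invalid json", "json", "verdict", "payload"] (fun m => PySem.Str.isIn m fr)) = a8
  generalize (List.any ["diff fence", "fenced block", "```diff", "malformed diff"] (fun m => PySem.Str.isIn m fr)) = a9
  by_cases h0 : fc = "connector_unavailable"
  · subst h0; revert a0 a1 a2 a4 a5 a6 a7 a8 a9; decide
  by_cases h1 : fc = "connector_runtime_error"
  · subst h1; revert a0 a1 a2 a4 a5 a6 a7 a8 a9; decide
  by_cases h2 : fc = "no_patch"
  · subst h2; revert a0 a1 a2 a4 a5 a6 a7 a8 a9; decide
  by_cases h3 : fc = "empty_diff"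
  · subst h3; revert a0 a1 a2 a4 a5 a6 a7 a8 a9; decide
  by_cases h4 : fc = "malformed_diff"
  · subst h4; revert a0 a1 a2 a4 a5 a6 a7 a8 a9; decide
  by_cases h6 : fc = "patch_apply_failed"
  · subst h6; revert a0 a1 a2 a4 a5 a6 a7 a8 a9; decide
  by_cases h7 : fc = "no_code_diff"
  · subst h7; revert a0 a1 a2 a4 a5 a6 a7 a8 a9; decide
  by_cases h8 : fc = "verifier_failed"
  · subst h8; revert a0 a1 a2 a4 a5 a6 a7 a8 a9; decide
  by_cases h9 : fc = "diff_limit_exceeded"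
  · subst h9; revert a0 a1 a2 a4 a5 a6 a7 a8 a9; decide
  by_cases hn : is_no_workspace_change_failure_class_py fc = true
  · simp only [beq_eq_false_iff_ne.mpr h0, beq_eq_false_iff_ne.mpr (Ne.symm h0), beq_eq_false_iff_ne.mpr h1, beq_eq_false_iff_ne.mpr (Ne.symm h1), beq_eq_false_iff_ne.mpr h2, beq_eq_false_iff_ne.mpr (Ne.symm h2), beq_eq_false_iff_ne.mpr h3, beq_eq_false_iff_ne.mpr (Ne.symm h3), beq_eq_false_iff_ne.mpr h4, beq_eq_false_iff_ne.mpr (Ne.symm h4), beq_eq_false_iff_ne.mpr h6, beq_eq_false_iff_ne.mpr (Ne.symm h6), beq_eq_false_iff_ne.mpr h7, beq_eq_false_iff_ne.mpr (Ne.symm h7), beq_eq_false_iff_ne.mpr h8, beq_eq_false_iff_ne.mpr (Ne.symm h8), beq_eq_false_iff_ne.mpr h9, beq_eq_false_iff_ne.mpr (Ne.symm h9), hn, Bool.false_or, Bool.true_or, if_true]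
    revert a0 a1 a2 a4 a5 a6 a7 a8 a9; decide
  · rw [Bool.not_eq_true] at hn
    simp only [beq_eq_false_iff_ne.mpr h0, beq_eq_false_iff_ne.mpr (Ne.symm h0), beq_eq_false_iff_ne.mpr h1, beq_eq_false_iff_ne.mpr (Ne.symm h1), beq_eq_false_iff_ne.mpr h2, beq_eq_false_iff_ne.mpr (Ne.symm h2), beq_eq_false_iff_ne.mpr h3, beq_eq_false_iff_ne.mpr (Ne.symm h3), beq_eq_false_iff_ne.mpr h4, beq_eq_false_iff_ne.mpr (Ne.symm h4), beq_eq_false_iff_ne.mpr h6, beq_eq_false_iff_ne.mpr (Ne.symm h6), beq_eq_false_iff_ne.mpr h7, beq_eq_false_iff_ne.mpr (Ne.symm h7), beq_eq_false_iff_ne.mpr h8, beq_eq_false_iff_ne.mpr (Ne.symm h8), beq_eq_false_iff_ne.mpr h9, beq_eq_false_iff_ne.mpr (Ne.symm h9), hn, Bool.false_or]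
    revert a0 a1 a2 a4 a5 a6 a7 a8 a9; decide

-- ===== VERDICT (by name: the statement is the Claim_ definition above) =====
theorem connector_debug_focus_py_spec : Claim_equal_connector_debug_focus_py := by
  intro issue attempt _
  unfold Spec_connector_debug_focus_py connector_debug_focus_py connector_debug_focus_py_alt
  exact pv_core_eq _ _
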